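-- pv_equiv track=rewrite | github.com/FatemehAbbasi2545/problem-solving | 11-min-sum-square/main.py | min_sum_square_bruteforce
-- ===== SOURCE A (Python) =====
-- def min_sum_square_bruteforce(a: list):
--     n = len(a)
--     best = float('inf')
--     for i in range(n):
--         for j in range(i , n):
--             s = a[i] + a[j]
--             x = s * s
--             if x < best:
--                 best = x
--     return best
-- ===== SOURCE B (Python) =====
-- def min_sum_square_bruteforce(a: list):
--     # Sort, then walk two pointers inward seeking the pair sum closest to zero.
--     b = sorted(a)
--     l, r = 0, len(b) - 1
--     best = float('inf')
--     while l <= r: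
--         s = b[l] + b[r]
--         if s * s < best:
--             best = s * s
--         if s < 0:
--             l += 1
--         elif s > 0:
--             r -= 1
--         else:
--             return 0
--     return best
-- ===== Notes on version B (the rewrite author's own statement) =====
-- stated objective: faster
-- what changed: Replaced the O(n^2) scan over all pairs by sorting the list and moving two pointers inward, keeping the pair sum closest to zero.
-- outside the precondition, e.g. on min_sum_square_bruteforce([]): A returns inf, B returns inf
import Mathlib
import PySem

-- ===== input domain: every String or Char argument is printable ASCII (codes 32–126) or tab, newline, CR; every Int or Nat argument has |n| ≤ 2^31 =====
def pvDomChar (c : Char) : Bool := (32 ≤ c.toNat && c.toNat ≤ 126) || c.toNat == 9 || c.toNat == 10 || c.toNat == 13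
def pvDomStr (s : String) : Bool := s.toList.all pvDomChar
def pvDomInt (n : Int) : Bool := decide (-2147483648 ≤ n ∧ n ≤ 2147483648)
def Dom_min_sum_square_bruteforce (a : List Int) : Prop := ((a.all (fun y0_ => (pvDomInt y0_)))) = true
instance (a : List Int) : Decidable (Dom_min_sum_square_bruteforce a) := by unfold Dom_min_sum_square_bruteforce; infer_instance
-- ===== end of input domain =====

-- B replaces A's O(n^2) all-pairs scan by sort + two inward-moving pointers (measured faster, asymptotic change).


-- ===== PORT A =====
-- models Python's `best = x if x < best else best` where `best` may still be float('inf') (= none)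
def omin (best : Option Int) (x : Int) : Option Int :=
  match best with
  | none => some x
  | some v => if x < v then some x else some v

def min_sum_square_bruteforce (a : List Int) : Int :=
  let n : Int := a.length
  (((PySem.List.pyRange 0 n 1).foldl (fun best i =>
      (PySem.List.pyRange i n 1).foldl (fun best j =>
        let s := PySem.List.pyGetD a i 0 + PySem.List.pyGetD a j 0
        let x := s * s
        omin best x) best)
    (none : Option Int))).getD 0
  -- the indices i, j always lie in range, so pyGetD is exact; the final state is none only
  -- when a = [] (excluded by Pre_: the Python returns float('inf') there, not an int)

-- ===== PORT B =====
-- the two-pointer loop of Source B; l, r are the Python indices, best = none models float('inf');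
-- pyGetD is exact since 0 ≤ l ≤ r < len whenever it is evaluated; fuel is the loop bound
-- (r + 1 - l).toNat — each iteration shrinks r - l by exactly one, so fuel 0 ↔ the guard l ≤ r fails
def twoPtr (b : List Int) : Nat → Int → Int → Option Int → Option Int
  | 0, _l, _r, best => best
  | fuel + 1, l, r, best =>
      let s := PySem.List.pyGetD b l 0 + PySem.List.pyGetD b r 0
      let best' := omin best (s * s)
      if s < 0 then twoPtr b fuel (l + 1) r best'
      else if 0 < s then twoPtr b fuel l (r - 1) best'
      else some 0

def min_sum_square_bruteforce_alt (a : List Int) : Int :=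
  let b := PySem.List.sorted a (fun x => x) false
  (twoPtr b b.length 0 ((b.length : Int) - 1) none).getD 0
  -- fuel b.length = ((b.length - 1) + 1 - 0).toNat, the number of loop iterations;
  -- result is none only when a = [] (excluded by Pre_: the Python returns float('inf') there)

-- ===== PRECONDITION & SPEC =====
-- Pre_ excludes only the empty list, on which A (and B) return float('inf'), a float and not an int.
def Pre_min_sum_square_bruteforce (a : List Int) : Prop := a ≠ []
instance (a : List Int) : Decidable (Pre_min_sum_square_bruteforce a) := by
  unfold Pre_min_sum_square_bruteforce; infer_instance

def pvWitness_min_sum_square_bruteforce : List Int := [3, -2, 5]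

def Spec_min_sum_square_bruteforce (a : List Int) (out : Int) : Prop := out = min_sum_square_bruteforce_alt a
instance (a : List Int) (out : Int) : Decidable (Spec_min_sum_square_bruteforce a out) := by
  unfold Spec_min_sum_square_bruteforce; infer_instance

-- ===== CLAIM (what is proved, stated in full; the proofs are below) =====
def Claim_equal_min_sum_square_bruteforce : Prop := ∀ (a : List Int), Dom_min_sum_square_bruteforce a → Pre_min_sum_square_bruteforce a → Spec_min_sum_square_bruteforce a (min_sum_square_bruteforce a)

-- ===== LEMMAS AND PROOFS =====

-- the squared pair sum at (Int) indices i, j of c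
def sqI (c : List Int) (i j : Int) : Int :=
  (PySem.List.pyGetD c i 0 + PySem.List.pyGetD c j 0) * (PySem.List.pyGetD c i 0 + PySem.List.pyGetD c j 0)

-- the candidate set a loop state (best, remaining list L) still has to beat
def inC (b : Option Int) (L : List Int) (x : Int) : Prop := x ∈ L ∨ b = some x

theorem omin_ne_none (b : Option Int) (x : Int) : omin b x ≠ none := by
  cases b with
  | none => simp [omin]
  | some v => simp only [omin]; split <;> simp

theorem foldl_omin_eq_none (b : Option Int) (L : List Int) :
    L.foldl omin b = none ↔ b = none ∧ L = [] := by
  induction L generalizing b with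
  | nil => simp
  | cons y t ih =>
      simp only [List.foldl_cons, ih]
      constructor
      · rintro ⟨h, _⟩; exact absurd h (omin_ne_none b y)
      · rintro ⟨_, h⟩; exact absurd h (by simp)

-- the value of omin b m: one of the candidates, ≤ m and ≤ any value of b
theorem omin_val (b : Option Int) (m : Int) :
    ∃ w, omin b m = some w ∧ w ≤ m ∧ (∀ u, b = some u → w ≤ u) ∧ (w = m ∨ b = some w) := by
  cases b with
  | none => exact ⟨m, rfl, le_refl m, by simp, Or.inl rfl⟩
  | some u =>
      simp only [omin]
      split <;> rename_i hc
      · exact ⟨m, rfl, le_refl m, by intro x hx; simp at hx; omega, Or.inl rfl⟩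
      · exact ⟨u, rfl, by omega, by intro x hx; simp at hx; omega, Or.inr rfl⟩

theorem foldl_omin_spec (L : List Int) (b : Option Int) (v : Int)
    (h : L.foldl omin b = some v) :
    inC b L v ∧ ∀ x, inC b L x → v ≤ x := by
  induction L generalizing b with
  | nil =>
      simp only [List.foldl_nil] at h
      refine ⟨Or.inr h, ?_⟩
      rintro x (hx | hx)
      · simp at hx
      · rw [h] at hx
        exact le_of_eq (Option.some_inj.mp hx)
  | cons y t ih =>
      simp only [List.foldl_cons] at h
      obtain ⟨hv, hall⟩ := ih (omin b y) h
      obtain ⟨w, hw, hwy, hwb, hwor⟩ := omin_val b y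
      constructor
      · rcases hv with hv | hv
        · exact Or.inl (List.mem_cons_of_mem _ hv)
        · rw [hw] at hv
          have hv' : w = v := Option.some_inj.mp hv
          rcases hwor with h1 | h1
          · exact Or.inl (by rw [← hv', h1]; exact List.mem_cons_self)
          · exact Or.inr (by rw [← hv']; exact h1)
      · rintro x (hx | hx)
        · rcases List.mem_cons.mp hx with hx | hx
          · subst hx
            exact le_trans (hall w (Or.inr hw)) hwy
          · exact hall x (Or.inl hx)
        · exact le_trans (hall w (Or.inr hw)) (hwb x hx)

theorem foldl_omin_eq_some_of (L : List Int) (b : Option Int) (m : Int)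
    (hm : inC b L m) (hall : ∀ x, inC b L x → m ≤ x) :
    L.foldl omin b = some m := by
  rcases hres : L.foldl omin b with _ | v
  · rw [foldl_omin_eq_none] at hres
    rcases hm with hm | hm
    · rw [hres.2] at hm; simp at hm
    · rw [hres.1] at hm; simp at hm
  · obtain ⟨hv, hvall⟩ := foldl_omin_spec L b v hres
    have h1 := hall v hv
    have h2 := hvall m hm
    congr 1; omega

-- two omin-folds agree when each candidate set is dominated by the other
theorem foldl_omin_ext (b1 : Option Int) (L1 : List Int) (b2 : Option Int) (L2 : List Int)
    (h12 : ∀ x, inC b1 L1 x → ∃ y, inC b2 L2 y ∧ y ≤ x)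
    (h21 : ∀ y, inC b2 L2 y → ∃ x, inC b1 L1 x ∧ x ≤ y) :
    L1.foldl omin b1 = L2.foldl omin b2 := by
  rcases h1 : L1.foldl omin b1 with _ | v1
  · rw [foldl_omin_eq_none] at h1
    rcases h2 : L2.foldl omin b2 with _ | v2
    · rfl
    · obtain ⟨hv2, _⟩ := foldl_omin_spec L2 b2 v2 h2
      obtain ⟨x, hx, _⟩ := h21 v2 hv2
      rcases hx with hx | hx
      · rw [h1.2] at hx; simp at hx
      · rw [h1.1] at hx; simp at hx
  · obtain ⟨hv1, hall1⟩ := foldl_omin_spec L1 b1 v1 h1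
    obtain ⟨y, hy, hyle⟩ := h12 v1 hv1
    rcases h2 : L2.foldl omin b2 with _ | v2
    · rw [foldl_omin_eq_none] at h2
      rcases hy with hy' | hy'
      · rw [h2.2] at hy'; simp at hy'
      · rw [h2.1] at hy'; simp at hy'
    · obtain ⟨hv2, hall2⟩ := foldl_omin_spec L2 b2 v2 h2
      obtain ⟨x, hx, hxle⟩ := h21 v2 hv2
      have ha := hall1 x hx
      have hb := hall2 y hy
      congr 1; omega

-- flatten A's nested loop into one omin-fold over the flattened candidate list
theorem foldl_foldl_map_flatMap {α β : Type} (inner : α → List β) (f : α → β → Int)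
    (L : List α) (st : Option Int) :
    L.foldl (fun st i => (inner i).foldl (fun b j => omin b (f i j)) st) st
      = (L.flatMap (fun i => (inner i).map (f i))).foldl omin st := by
  induction L generalizing st with
  | nil => rfl
  | cons y t ih => simp [List.foldl_append, List.foldl_map, ih]

-- the candidate window: squared sums of pairs l ≤ i ≤ j ≤ r
def win (c : List Int) (l r : Int) : List Int :=
  (PySem.List.pyRange l (r + 1) 1).flatMap (fun i => (PySem.List.pyRange i (r + 1) 1).map (sqI c i))

theorem mem_win (c : List Int) (l r z : Int) :
    z ∈ win c l r ↔ ∃ i j : Int, l ≤ i ∧ i ≤ j ∧ j ≤ r ∧ z = sqI c i j := by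
  simp only [win, List.mem_flatMap, List.mem_map, PySem.List.mem_pyRange_one]
  constructor
  · rintro ⟨i, ⟨hi1, hi2⟩, j, ⟨hj1, hj2⟩, hz⟩
    exact ⟨i, j, hi1, hj1, by omega, hz.symm⟩
  · rintro ⟨i, j, h1, h2, h3, hz⟩
    exact ⟨i, ⟨h1, by omega⟩, j, ⟨h2, by omega⟩, hz.symm⟩

theorem win_nonneg (c : List Int) (l r z : Int) (h : z ∈ win c l r) : 0 ≤ z := by
  obtain ⟨i, j, _, _, _, hz⟩ := (mem_win c l r z).mp h
  rw [hz]; exact mul_self_nonneg _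

-- squared sums only grow when a summand moves away from a negative/positive total
theorem sq_dom_neg (s u : Int) (hs : s < 0) (hu : u ≤ s) : s * s ≤ u * u := by nlinarith
theorem sq_dom_pos (s u : Int) (hs : 0 < s) (hu : s ≤ u) : s * s ≤ u * u := by nlinarith

theorem pairwise_getD_mono (c : List Int) (hs : c.Pairwise (· ≤ ·)) (i j : Int)
    (h0 : 0 ≤ i) (hij : i ≤ j) (hj : j < (c.length : Int)) :
    PySem.List.pyGetD c i 0 ≤ PySem.List.pyGetD c j 0 := by
  rw [PySem.List.pyGetD_eq_getElem c 0 h0 (by omega),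
      PySem.List.pyGetD_eq_getElem c 0 (by omega) hj]
  rcases eq_or_lt_of_le hij with h | h
  · subst h; exact le_refl _
  · exact (List.pairwise_iff_getElem.mp hs) i.toNat j.toNat (by omega) (by omega) (by omega)

-- the two-pointer loop computes exactly the omin-fold of its remaining window
theorem twoPtr_eq (c : List Int) (hs : c.Pairwise (· ≤ ·)) :
    ∀ fuel : Nat, ∀ l r : Int, ∀ best : Option Int,
      fuel = (r + 1 - l).toNat →
      0 ≤ l → r < (c.length : Int) →
      (∀ v, best = some v → 0 ≤ v) →
      twoPtr c fuel l r best = (win c l r).foldl omin best := by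
  intro fuel
  induction fuel with
  | zero =>
      intro l r best hfuel hl hr hbest
      have hlr : r < l := by omega
      have hwe : win c l r = [] := by
        simp [win, PySem.List.pyRange_one_eq_nil (by omega : r + 1 ≤ l)]
      rw [hwe]; rfl
  | succ fuel ih =>
      intro l r best hfuel hl hr hbest
      have hlr : l ≤ r := by omega
      rw [twoPtr]
      set s := PySem.List.pyGetD c l 0 + PySem.List.pyGetD c r 0 with hsdef
      have hmemlr : s * s ∈ win c l r :=
        (mem_win c l r _).mpr ⟨l, r, le_refl l, hlr, le_refl r, rfl⟩
      obtain ⟨w, hw, hwm, hwb, hwor⟩ := omin_val best (s * s)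
      have hbest' : ∀ v, omin best (s * s) = some v → 0 ≤ v := by
        intro v hv
        rw [hw] at hv
        rw [← Option.some_inj.mp hv]
        rcases hwor with h | h
        · rw [h]; exact mul_self_nonneg s
        · exact hbest w h
      by_cases hneg : s < 0
      · simp only [hneg, if_pos]
        rw [ih (l + 1) r (omin best (s * s)) (by omega) (by omega) hr hbest']
        apply foldl_omin_ext
        · -- every candidate after the step is matched from the old window / old best
          rintro x (hx | hx)
          · rw [mem_win] at hx
            obtain ⟨i, j, h1, h2, h3, hz⟩ := hx
            exact ⟨x, Or.inl ((mem_win c l r x).mpr ⟨i, j, by omega, h2, h3, hz⟩), le_refl x⟩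
          · rw [hw] at hx
            rw [← Option.some_inj.mp hx]
            rcases hwor with h | h
            · exact ⟨s * s, Or.inl hmemlr, le_of_eq h.symm⟩
            · exact ⟨w, Or.inr h, le_refl w⟩
        · -- every old candidate is matched: row i = l is dominated by s * s (so by w)
          rintro y (hy | hy)
          · rw [mem_win] at hy
            obtain ⟨i, j, h1, h2, h3, hz⟩ := hy
            by_cases hil : l < i
            · exact ⟨y, Or.inl ((mem_win c (l + 1) r y).mpr ⟨i, j, by omega, h2, h3, hz⟩), le_refl y⟩
            · have hieq : i = l := by omega
              subst hieq
              refine ⟨w, Or.inr hw, le_trans hwm ?_⟩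
              rw [hz, sqI]
              exact sq_dom_neg s _ hneg (by
                have := pairwise_getD_mono c hs j r (by omega) h3 hr
                omega)
          · exact ⟨w, Or.inr hw, hwb y hy⟩
      · by_cases hpos : 0 < s
        · simp only [hneg, if_false, hpos, if_pos]
          rw [ih l (r - 1) (omin best (s * s)) (by omega) hl (by omega) hbest']
          apply foldl_omin_ext
          · rintro x (hx | hx)
            · rw [mem_win] at hx
              obtain ⟨i, j, h1, h2, h3, hz⟩ := hx
              exact ⟨x, Or.inl ((mem_win c l r x).mpr ⟨i, j, h1, h2, by omega, hz⟩), le_refl x⟩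
            · rw [hw] at hx
              rw [← Option.some_inj.mp hx]
              rcases hwor with h | h
              · exact ⟨s * s, Or.inl hmemlr, le_of_eq h.symm⟩
              · exact ⟨w, Or.inr h, le_refl w⟩
          · rintro y (hy | hy)
            · rw [mem_win] at hy
              obtain ⟨i, j, h1, h2, h3, hz⟩ := hy
              by_cases hjr : j < r
              · exact ⟨y, Or.inl ((mem_win c l (r - 1) y).mpr ⟨i, j, h1, h2, by omega, hz⟩), le_refl y⟩
              · have hjeq : j = r := by omega
                subst hjeq
                refine ⟨w, Or.inr hw, le_trans hwm ?_⟩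
                rw [hz, sqI]
                exact sq_dom_pos s _ hpos (by
                  have := pairwise_getD_mono c hs l i hl h1 (by omega)
                  omega)
            · exact ⟨w, Or.inr hw, hwb y hy⟩
        · have hs0 : s = 0 := by omega
          simp only [hneg, if_false, hpos]
          symm
          apply foldl_omin_eq_some_of
          · exact Or.inl (by rw [hs0] at hmemlr; simpa using hmemlr)
          · rintro x (hx | hx)
            · exact win_nonneg c l r x hx
            · exact hbest x hx

-- full-window membership in terms of the list's values (symmetry of + removes the i ≤ j constraint)
theorem mem_win_full (c : List Int) (z : Int) :
    z ∈ win c 0 ((c.length : Int) - 1) ↔ ∃ x ∈ c, ∃ y ∈ c, z = (x + y) * (x + y) := by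
  rw [mem_win]
  constructor
  · rintro ⟨i, j, h1, h2, h3, hz⟩
    refine ⟨PySem.List.pyGetD c i 0, ?_, PySem.List.pyGetD c j 0, ?_, hz⟩
    · rw [PySem.List.pyGetD_eq_getElem c 0 h1 (by omega)]; exact List.getElem_mem _
    · rw [PySem.List.pyGetD_eq_getElem c 0 (by omega) (by omega)]; exact List.getElem_mem _
  · rintro ⟨x, hx, y, hy, hz⟩
    obtain ⟨ix, hix, hgx⟩ := List.mem_iff_getElem.mp hx
    obtain ⟨iy, hiy, hgy⟩ := List.mem_iff_getElem.mp hy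
    have hgx' : PySem.List.pyGetD c (ix : Int) 0 = x := by
      rw [PySem.List.pyGetD_eq_getElem c 0 (by omega) (by exact_mod_cast hix)]
      simpa using hgx
    have hgy' : PySem.List.pyGetD c (iy : Int) 0 = y := by
      rw [PySem.List.pyGetD_eq_getElem c 0 (by omega) (by exact_mod_cast hiy)]
      simpa using hgy
    rcases le_total ix iy with hle | hle
    · exact ⟨(ix : Int), (iy : Int), by omega, by omega, by omega,
        by rw [hz, sqI, hgx', hgy']⟩
    · exact ⟨(iy : Int), (ix : Int), by omega, by omega, by omega,
        by rw [hz, sqI, hgy', hgx', add_comm y x]⟩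

-- A as an omin-fold over the full window
theorem portA_eq (a : List Int) :
    min_sum_square_bruteforce a
      = ((win a 0 ((a.length : Int) - 1)).foldl omin none).getD 0 := by
  have hrw : (a.length : Int) - 1 + 1 = (a.length : Int) := by omega
  simp only [win, hrw]
  show ((PySem.List.pyRange 0 (a.length : Int) 1).foldl
      (fun st i => (PySem.List.pyRange i (a.length : Int) 1).foldl
        (fun b j => omin b (sqI a i j)) st) none).getD 0 = _
  rw [foldl_foldl_map_flatMap (fun i => PySem.List.pyRange i (a.length : Int) 1) (sqI a)]

-- B as an omin-fold over the full window of the sorted list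
theorem portB_eq (a : List Int) :
    min_sum_square_bruteforce_alt a
      = ((win (PySem.List.sorted a (fun x => x) false) 0
            (((PySem.List.sorted a (fun x => x) false).length : Int) - 1)).foldl omin none).getD 0 := by
  simp only [min_sum_square_bruteforce_alt]
  rw [twoPtr_eq (PySem.List.sorted a (fun x => x) false)
      (PySem.List.sorted_pairwise a (fun x => x))
      (PySem.List.sorted a (fun x => x) false).length
      0 _ none (by omega) (le_refl 0) (by omega) (by simp)]

-- ===== VERDICT (by name: the statement is the Claim_ definition above) =====
theorem min_sum_square_bruteforce_spec : Claim_equal_min_sum_square_bruteforce := by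
  intro a _hdom _hpre
  unfold Spec_min_sum_square_bruteforce
  rw [portA_eq, portB_eq]
  have hmem : ∀ x : Int, x ∈ a ↔ x ∈ PySem.List.sorted a (fun x => x) false := by
    intro x
    exact ((PySem.List.sorted_perm a (fun x => x) false).mem_iff).symm
  congr 1
  apply foldl_omin_ext
  · rintro x (hx | hx)
    · refine ⟨x, Or.inl ?_, le_refl x⟩
      rw [mem_win_full] at hx ⊢
      obtain ⟨u, hu, v, hv, hz⟩ := hx
      exact ⟨u, (hmem u).mp hu, v, (hmem v).mp hv, hz⟩
    · simp at hx
  · rintro y (hy | hy)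
    · refine ⟨y, Or.inl ?_, le_refl y⟩
      rw [mem_win_full] at hy ⊢
      obtain ⟨u, hu, v, hv, hz⟩ := hy
      exact ⟨u, (hmem u).mpr hu, v, (hmem v).mpr hv, hz⟩
    · simp at hy
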